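-- pv_equiv track=rewrite | github.com/osirptpm/openapi-to-markdown | openapi_to_markdown/utils/markdown_utils.py | create_anchor
-- ===== SOURCE A (Python) =====
-- def create_anchor(text):
--     """
--     텍스트에서 마크다운 앵커를 생성합니다.
--
--     Args:
--         text: 앵커를 생성할 텍스트
--
--     Returns:
--         str: 마크다운 앵커 문자열
--     """
--     if not text:
--         return ""
--
--     # 모든 특수 문자 제거하고 공백을 하이픈으로 변경
--     anchor = text.lower()
--     anchor = ''.join(c if c.isalnum() or c == ' ' else '-' for c in anchor)
--     anchor = anchor.replace(' ', '-')
--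
--     # 연속된 하이픈을 하나로 통합
--     while '--' in anchor:
--         anchor = anchor.replace('--', '-')
--
--     return anchor
-- ===== SOURCE B (Python) =====
-- def create_anchor(text):
--     if not text:
--         return ""
--     out = []
--     dash = False
--     for c in text.lower():
--         if c.isalnum():
--             out.append(c)
--             dash = False
--         elif not dash:
--             out.append('-')
--             dash = True
--     return ''.join(out)
-- ===== Notes on version B (the rewrite author's own statement) =====
-- stated objective: simpler
-- what changed: A builds a mapped string, runs a second space-to-hyphen replace pass and then repeatedly rescans the whole string collapsing doubled hyphens until a fixpoint; B is one single pass over the lowered text carrying a last-char-was-a-hyphen flag, emitting a hyphen only when the previously emitted char was not one.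
import Mathlib
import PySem

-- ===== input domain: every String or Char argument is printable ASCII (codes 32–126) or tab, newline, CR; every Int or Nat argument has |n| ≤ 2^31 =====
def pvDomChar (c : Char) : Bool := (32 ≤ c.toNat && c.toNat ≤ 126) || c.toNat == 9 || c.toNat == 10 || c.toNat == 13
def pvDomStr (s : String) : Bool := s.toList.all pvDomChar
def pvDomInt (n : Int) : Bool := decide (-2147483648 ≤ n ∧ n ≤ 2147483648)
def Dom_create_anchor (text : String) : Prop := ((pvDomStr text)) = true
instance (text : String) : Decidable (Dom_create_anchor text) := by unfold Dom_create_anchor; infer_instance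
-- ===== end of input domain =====

-- B replaces A's build-then-replace-then-while-collapse multi-pass scheme with a single
-- state-carrying pass over text.lower() (a "last emitted char was a dash" flag); objective: simpler.

-- ===== PORT A =====
-- Helper definitions/lemmas the port's `while '--' in anchor` loop needs for termination
-- (cited by name in decreasing_by):

-- Python's non-overlapping left-to-right result of s.replace('--','-') (characterisation only)
def pvRep : List Char → List Char
  | [] => []
  | [c] => [c]
  | c :: c' :: r => if c = '-' ∧ c' = '-' then '-' :: pvRep r else c :: pvRep (c' :: r)

theorem pvReplace_go_dd (fuel : Nat) : ∀ (l acc : List Char), l.length ≤ fuel →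
    PySem.Chars.replace.go ['-', '-'] ['-'] fuel l acc = acc.reverse ++ pvRep l := by
  induction fuel with
  | zero =>
    intro l acc h
    have : l = [] := List.eq_nil_of_length_eq_zero (Nat.le_zero.mp h)
    subst this
    simp [PySem.Chars.replace.go, pvRep]
  | succ n ih =>
    intro l acc h
    match l with
    | [] => simp [PySem.Chars.replace.go, pvRep]
    | [c] =>
      rw [PySem.Chars.replace.go]
      rw [if_neg (by simp [List.isPrefixOf])]
      rw [ih [] (c :: acc) (by simp)]
      simp [pvRep]
    | c :: c' :: t =>
      simp only [List.length_cons] at h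
      by_cases hp : c = '-' ∧ c' = '-'
      · obtain ⟨rfl, rfl⟩ := hp
        rw [PySem.Chars.replace.go]
        rw [if_pos (by simp [List.isPrefixOf])]
        simp only [List.length_cons, List.drop_succ_cons, List.drop_zero, List.length_nil,
          Nat.zero_add]
        rw [ih t (['-'].reverse ++ acc) (by omega)]
        simp [pvRep]
      · rw [PySem.Chars.replace.go]
        rw [if_neg (by simp [List.isPrefixOf]; intro h1 h2; exact hp ⟨h1.symm, h2.symm⟩)]
        rw [ih (c' :: t) (c :: acc) (by simp; omega)]
        rw [pvRep, if_neg hp]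
        simp

theorem pvReplace_dd (s : List Char) :
    PySem.Chars.replace s ['-', '-'] ['-'] = pvRep s := by
  rw [PySem.Chars.replace]
  rw [if_neg (by simp)]
  simpa using pvReplace_go_dd s.length s [] le_rfl

theorem pvRep_length_le (s : List Char) : (pvRep s).length ≤ s.length := by
  induction s using pvRep.induct with
  | case1 => simp [pvRep]
  | case2 c => simp [pvRep]
  | case3 c c' r hp ih => simp [pvRep, if_pos hp]; omega
  | case4 c c' r hp ih => rw [pvRep, if_neg hp]; simp at ih ⊢; omega

-- Python's `'--' in s`, structurally
def pvHasDD : List Char → Bool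
  | [] => false
  | [_] => false
  | c :: c' :: r => (c = '-' && c' = '-') || pvHasDD (c' :: r)

theorem pvHasDD_iff_infix (s : List Char) : pvHasDD s = true ↔ ['-', '-'] <:+: s := by
  induction s using pvHasDD.induct with
  | case1 => simp [pvHasDD]
  | case2 c =>
    simp only [pvHasDD, Bool.false_eq_true, false_iff]
    intro h
    have := h.length_le
    simp at this
  | case3 c c' r ih =>
    rw [pvHasDD]
    rw [List.infix_cons_iff]
    constructor
    · intro h
      rcases Bool.or_eq_true_iff.mp h with h | h
      · obtain ⟨h1, h2⟩ := Bool.and_eq_true_iff.mp h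
        left
        exact List.cons_prefix_cons.mpr ⟨(decide_eq_true_iff.mp h1).symm,
          List.cons_prefix_cons.mpr ⟨(decide_eq_true_iff.mp h2).symm, List.nil_prefix⟩⟩
      · right; exact ih.mp h
    · intro h
      rcases h with h | h
      · obtain ⟨h1, h2⟩ := List.cons_prefix_cons.mp h
        obtain ⟨h3, _⟩ := List.cons_prefix_cons.mp h2
        simp [h1.symm, h3.symm]
      · simp [ih.mpr h]

theorem pvIsIn_dd (s : List Char) : PySem.Chars.isIn ['-', '-'] s = pvHasDD s := by
  by_cases h : pvHasDD s = true
  · rw [h, (PySem.Chars.isIn_iff_infix _ _).mpr ((pvHasDD_iff_infix s).mp h)]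
  · rw [Bool.not_eq_true] at h
    rw [h, PySem.Chars.isIn_eq_false_iff]
    intro hin
    rw [← pvHasDD_iff_infix] at hin
    simp [h] at hin

theorem pvRep_length_lt (s : List Char) (h : pvHasDD s = true) :
    (pvRep s).length < s.length := by
  induction s using pvRep.induct with
  | case1 => simp [pvHasDD] at h
  | case2 c => simp [pvHasDD] at h
  | case3 c c' r hp ih =>
    have := pvRep_length_le r
    simp [pvRep, if_pos hp]
    omega
  | case4 c c' r hp ih =>
    rw [pvRep, if_neg hp]
    rw [pvHasDD] at h
    rcases Bool.or_eq_true_iff.mp h with h' | h'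
    · obtain ⟨h1, h2⟩ := Bool.and_eq_true_iff.mp h'
      exact absurd ⟨decide_eq_true_iff.mp h1, decide_eq_true_iff.mp h2⟩ hp
    · have := ih h'
      simp at this ⊢
      omega

theorem pvReplace_dd_length_lt (s : List Char) (h : PySem.Chars.isIn ['-', '-'] s = true) :
    (PySem.Chars.replace s ['-', '-'] ['-']).length < s.length := by
  rw [pvReplace_dd]
  exact pvRep_length_lt s (by rwa [pvIsIn_dd] at h)

-- `while '--' in anchor: anchor = anchor.replace('--', '-')`
def pvCaLoop (s : List Char) : List Char :=
  if h : PySem.Chars.isIn ['-', '-'] s = true then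
    pvCaLoop (PySem.Chars.replace s ['-', '-'] ['-'])
  else s
termination_by s.length
decreasing_by exact pvReplace_dd_length_lt s h

def create_anchor (text : String) : String :=
  if text = "" then ""          -- `if not text: return ""`
  else
    let anchor := PySem.Str.lower text
    -- `''.join(c if c.isalnum() or c == ' ' else '-' for c in anchor)`
    let anchor := anchor.toList.map (fun c => if PySem.Chars.isalnum c || c == ' ' then c else '-')
    -- `anchor.replace(' ', '-')`
    let anchor := PySem.Chars.replace anchor [' '] ['-']
    String.ofList (pvCaLoop anchor)

-- ===== PORT B =====
def create_anchor_alt (text : String) : String :=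
  if text = "" then ""
  else
    -- single pass over text.lower(): `out` buffer plus a `dash` flag
    let st := (PySem.Chars.lower text.toList).foldl
      (fun (st : List Char × Bool) c =>
        if PySem.Chars.isalnum c then (st.1 ++ [c], false)
        else if !st.2 then (st.1 ++ ['-'], true)
        else st)
      ([], false)
    String.ofList st.1            -- `''.join(out)`

-- ===== PRECONDITION & SPEC =====
def Spec_create_anchor (text : String) (out : String) : Prop := out = create_anchor_alt text
instance (text : String) (out : String) : Decidable (Spec_create_anchor text out) := by unfold Spec_create_anchor; infer_instance

-- ===== CLAIM (what is proved, stated in full; the proofs are below) =====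
def Claim_equal_create_anchor : Prop := ∀ (text : String), Dom_create_anchor text → Spec_create_anchor text (create_anchor text)

-- ===== LEMMAS AND PROOFS =====

theorem pvReplace_go_single (a b : Char) (fuel : Nat) : ∀ (l acc : List Char), l.length ≤ fuel →
    PySem.Chars.replace.go [a] [b] fuel l acc =
      acc.reverse ++ l.map (fun c => if c = a then b else c) := by
  induction fuel with
  | zero =>
    intro l acc h
    have : l = [] := List.eq_nil_of_length_eq_zero (Nat.le_zero.mp h)
    subst this
    simp [PySem.Chars.replace.go]
  | succ n ih =>
    intro l acc h
    match l with
    | [] => simp [PySem.Chars.replace.go]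
    | c :: t =>
      simp only [List.length_cons] at h
      by_cases hc : c = a
      · subst hc
        rw [PySem.Chars.replace.go]
        rw [if_pos (by simp [List.isPrefixOf])]
        simp only [List.length_cons, List.length_nil, Nat.zero_add, List.drop_succ_cons,
          List.drop_zero]
        rw [ih t ([b].reverse ++ acc) (by omega)]
        simp
      · rw [PySem.Chars.replace.go]
        rw [if_neg (by simp [List.isPrefixOf]; exact fun h' => hc h'.symm)]
        rw [ih t (c :: acc) (by omega)]
        simp [hc]

theorem pvReplace_single (s : List Char) (a b : Char) :
    PySem.Chars.replace s [a] [b] = s.map (fun c => if c = a then b else c) := by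
  rw [PySem.Chars.replace]
  rw [if_neg (by simp)]
  have : PySem.Chars.replace.go [a] [b] s.length s [] =
      ([] : List Char).reverse ++ s.map (fun c => if c = a then b else c) := by
    apply pvReplace_go_single
    exact le_rfl
  simpa using this

-- collapse of consecutive dashes, keyed on a "last char was a dash" flag
def pvCgo : Bool → List Char → List Char
  | _, [] => []
  | d, c :: r =>
    if c = '-' then (if d then pvCgo d r else '-' :: pvCgo true r)
    else c :: pvCgo false r

-- B's recursion, extracted from the foldl
def pvAbGo : Bool → List Char → List Char
  | _, [] => []
  | d, c :: r =>
    if PySem.Chars.isalnum c then c :: pvAbGo false r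
    else if !d then '-' :: pvAbGo true r
    else pvAbGo d r

theorem pvAlnum_ne_dash (c : Char) (h : PySem.Chars.isalnum c = true) : c ≠ '-' := by
  intro h'; subst h'
  exact absurd h (by decide)

theorem pvAlnum_ne_space (c : Char) (h : PySem.Chars.isalnum c = true) : c ≠ ' ' := by
  intro h'; subst h'
  exact absurd h (by decide)

theorem pvCgo_rep (s : List Char) : ∀ d, pvCgo d (pvRep s) = pvCgo d s := by
  induction s using pvRep.induct with
  | case1 => intro d; rfl
  | case2 c => intro d; rfl
  | case3 c c' r hp ih =>
    obtain ⟨rfl, rfl⟩ := hp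
    intro d
    rw [pvRep, if_pos ⟨rfl, rfl⟩]
    cases d with
    | true => simp [pvCgo, ih]
    | false => simp [pvCgo, ih]
  | case4 c c' r hp ih =>
    intro d
    rw [pvRep, if_neg hp]
    by_cases hc : c = '-'
    · subst hc
      cases d with
      | true => simp [pvCgo, ih]
      | false => simp [pvCgo, ih]
    · simp [pvCgo, hc, ih]

theorem pvCgo_no_dd (s : List Char) (h : pvHasDD s = false) : pvCgo false s = s := by
  induction s using pvHasDD.induct with
  | case1 => rfl
  | case2 c =>
    by_cases hc : c = '-'
    · subst hc; rfl
    · simp [pvCgo, hc]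
  | case3 c c' r ih =>
    rw [pvHasDD] at h
    simp only [Bool.or_eq_false_iff, Bool.and_eq_false_iff] at h
    obtain ⟨h1, h2⟩ := h
    have hrest : pvCgo false (c' :: r) = c' :: r := ih h2
    by_cases hc : c = '-'
    · subst hc
      have hc' : c' ≠ '-' := by
        rcases h1 with h1 | h1
        · simp at h1
        · exact fun he => by simp [he] at h1
      rw [pvCgo, if_pos rfl]
      simp only [Bool.false_eq_true, if_false]
      rw [pvCgo, if_neg hc']
      rw [pvCgo, if_neg hc'] at hrest
      rw [hrest]
    · rw [pvCgo, if_neg hc, hrest]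

theorem pvCaLoop_eq (s : List Char) : pvCaLoop s = pvCgo false s := by
  rw [pvCaLoop]
  split
  next h =>
    rw [pvReplace_dd]
    rw [pvCaLoop_eq (pvRep s)]
    exact pvCgo_rep s false
  next h =>
    rw [Bool.not_eq_true, pvIsIn_dd] at h
    exact (pvCgo_no_dd s h).symm
termination_by s.length
decreasing_by
  exact pvRep_length_lt s (by rwa [pvIsIn_dd] at *)

theorem pvAbGo_eq (l : List Char) : ∀ d,
    pvAbGo d l = pvCgo d (l.map (fun c => if PySem.Chars.isalnum c then c else '-')) := by
  induction l with
  | nil => intro d; rfl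
  | cons c r ih =>
    intro d
    by_cases ha : PySem.Chars.isalnum c = true
    · rw [pvAbGo, if_pos ha]
      simp only [List.map_cons, if_pos ha]
      rw [pvCgo, if_neg (pvAlnum_ne_dash c ha), ih false]
    · rw [pvAbGo, if_neg ha]
      simp only [List.map_cons, if_neg ha]
      rw [pvCgo, if_pos rfl]
      cases d with
      | true => simp [ih true]
      | false => simp [ih true]

theorem pvFoldl_eq (l : List Char) : ∀ out d,
    (l.foldl (fun (st : List Char × Bool) c =>
        if PySem.Chars.isalnum c then (st.1 ++ [c], false)
        else if !st.2 then (st.1 ++ ['-'], true)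
        else st) (out, d)).1 = out ++ pvAbGo d l := by
  induction l with
  | nil => intro out d; simp [pvAbGo]
  | cons c r ih =>
    intro out d
    by_cases ha : PySem.Chars.isalnum c = true
    · simp only [List.foldl_cons, if_pos ha]
      rw [ih (out ++ [c]) false, pvAbGo, if_pos ha]
      simp
    · simp only [List.foldl_cons, if_neg ha]
      cases d with
      | true =>
        simp only [Bool.not_true, Bool.false_eq_true, if_false]
        rw [ih out true, pvAbGo, if_neg ha]
        simp
      | false =>
        simp only [Bool.not_false, if_true]
        rw [ih (out ++ ['-']) true, pvAbGo, if_neg ha]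
        simp

-- fuse A's two mapping stages into B's single one (holds for every Char)
theorem pvMap_fuse (l : List Char) :
    (l.map (fun c => if PySem.Chars.isalnum c || c == ' ' then c else '-')).map
      (fun c => if c = ' ' then '-' else c) =
    l.map (fun c => if PySem.Chars.isalnum c then c else '-') := by
  rw [List.map_map]
  apply List.map_congr_left
  intro c _
  by_cases ha : PySem.Chars.isalnum c = true
  · simp [ha, pvAlnum_ne_space c ha]
  · by_cases hs : c = ' '
    · subst hs; simp [ha]
    · simp [ha, hs]

-- ===== VERDICT (by name: the statement is the Claim_ definition above) =====
theorem create_anchor_spec : Claim_equal_create_anchor := by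
  intro text _
  unfold Spec_create_anchor create_anchor create_anchor_alt
  by_cases he : text = ""
  · simp [he]
  · simp only [if_neg he]
    rw [pvReplace_single, PySem.Str.toList_lower, pvMap_fuse, pvCaLoop_eq,
      ← pvAbGo_eq, pvFoldl_eq]
    simp
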